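-- pv_equiv track=rewrite | github.com/RiaLeee/programmers | 프로그래머스/0/181881. 조건에 맞게 수열 변환하기 2/조건에 맞게 수열 변환하기 2.py | solution
-- ===== SOURCE A (Python) =====
-- def solution(arr):
--     count =0
--
--     while True:
--         preArr = arr[:]
--         arr = [i//2 if i >=50 and i%2==0 else(i*2+1 if i <50 and i%2!=0 else i) for i in arr]
--
--         count += 1
--         if arr == preArr:
--             return count-1
-- ===== SOURCE B (Python) =====
-- def _f(x):
--     return x // 2 if x >= 50 and x % 2 == 0 else (x * 2 + 1 if x < 50 and x % 2 != 0 else x)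
--
--
-- def solution(arr):
--     best = 0
--     for x in arr:
--         c = 0
--         while _f(x) != x:
--             x = _f(x)
--             c += 1
--         if c > best:
--             best = c
--     return best
-- ===== Notes on version B (the rewrite author's own statement) =====
-- stated objective: alternative
-- what changed: Replaces A's whole-array rounds-until-fixed-point loop (rebuilding and comparing the entire list each round) by independent per-element simulations: for each element count the applications of the step function until it is a fixed point, and return the maximum count (0 for an empty array).
import Mathlib
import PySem

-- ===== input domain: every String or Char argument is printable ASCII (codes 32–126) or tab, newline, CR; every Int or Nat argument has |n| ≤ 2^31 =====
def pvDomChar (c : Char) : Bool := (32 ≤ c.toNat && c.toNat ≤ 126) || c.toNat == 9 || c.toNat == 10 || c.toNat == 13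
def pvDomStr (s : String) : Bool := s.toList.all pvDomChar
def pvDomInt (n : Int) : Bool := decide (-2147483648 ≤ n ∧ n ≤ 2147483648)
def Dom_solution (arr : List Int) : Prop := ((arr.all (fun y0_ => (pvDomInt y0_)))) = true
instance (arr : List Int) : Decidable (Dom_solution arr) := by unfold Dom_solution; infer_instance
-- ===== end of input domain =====

-- B replaces the whole-array transform-until-stable loop by per-element step counting with a max (alternative decomposition, same transform).

-- ===== PORT A =====
-- A's 'while True' loop, with a fuel counter purely as a totality guard (64 rounds
-- always suffice on Pre_: every in-domain element converges within 36 steps).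
def solutionLoopA (arr : List Int) (count : Int) : Nat → Int
  | 0 => count
  | fuel + 1 =>
    let preArr := arr
    let arr' := arr.map (fun i =>
      if 50 ≤ i ∧ PySem.Int.mod i 2 = 0 then PySem.Int.floordiv i 2
      else if i < 50 ∧ PySem.Int.mod i 2 ≠ 0 then i * 2 + 1 else i)
    let count' := count + 1
    if arr' = preArr then count' - 1 else solutionLoopA arr' count' fuel

def solution (arr : List Int) : Int := solutionLoopA arr 0 64

-- ===== PORT B =====
def pvF (i : Int) : Int :=
  if 50 ≤ i ∧ PySem.Int.mod i 2 = 0 then PySem.Int.floordiv i 2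
  else if i < 50 ∧ PySem.Int.mod i 2 ≠ 0 then i * 2 + 1 else i

-- B's inner 'while _f(x) != x' loop, fueled purely as a totality guard.
def pvSteps (x : Int) : Nat → Int
  | 0 => 0
  | fuel + 1 => if pvF x ≠ x then 1 + pvSteps (pvF x) fuel else 0

def solution_alt (arr : List Int) : Int :=
  arr.foldl (fun best x => let c := pvSteps x 64; if c > best then c else best) 0

-- ===== PRECONDITION & SPEC =====
-- Pre_ excludes arrays containing a negative odd element other than -1: there A (and B)
-- never terminates (x*2+1 keeps such a number negative, odd and different from itself forever).
def Pre_solution (arr : List Int) : Prop := ∀ x ∈ arr, 0 ≤ x ∨ x % 2 = 0 ∨ x = -1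
instance (arr : List Int) : Decidable (Pre_solution arr) := by unfold Pre_solution; infer_instance
def pvWitness_solution : List Int := [1, 100, 64]

def Spec_solution (arr : List Int) (out : Int) : Prop := out = solution_alt arr
instance (arr : List Int) (out : Int) : Decidable (Spec_solution arr out) := by unfold Spec_solution; infer_instance

-- ===== CLAIM (what is proved, stated in full; the proofs are below) =====
def Claim_equal_solution : Prop := ∀ (arr : List Int), Dom_solution arr → Pre_solution arr → Spec_solution arr (solution arr)

-- ===== LEMMAS AND PROOFS =====

theorem pvF_emod (x : Int) :
    pvF x = if 50 ≤ x ∧ x % 2 = 0 then x / 2 else if x < 50 ∧ x % 2 ≠ 0 then x * 2 + 1 else x := by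
  unfold pvF
  rw [PySem.Int.mod_eq_emod_of_pos (by norm_num : (0:Int) < 2),
    PySem.Int.floordiv_eq_ediv_of_pos (by norm_num : (0:Int) < 2)]

theorem fix_small_even {x : Int} (h1 : x < 50) (h2 : x % 2 = 0) : pvF x = x := by
  rw [pvF_emod]; split_ifs <;> omega

theorem fix_big_odd {x : Int} (h1 : 50 ≤ x) (h2 : x % 2 ≠ 0) : pvF x = x := by
  rw [pvF_emod]; split_ifs <;> omega

theorem pvF_big_even {x : Int} (h1 : 50 ≤ x) (h2 : x % 2 = 0) : pvF x = x / 2 := by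
  rw [pvF_emod]; split_ifs <;> omega

theorem fix_iter {y : Int} (h : pvF y = y) : ∀ n : Nat, pvF^[n] y = y := by
  intro n
  induction n with
  | zero => rfl
  | succ m ih => rw [Function.iterate_succ_apply, h, ih]

theorem fix_mono {x : Int} {n m : Nat} (hle : n ≤ m) (h : pvF (pvF^[n] x) = pvF^[n] x) :
    pvF (pvF^[m] x) = pvF^[m] x := by
  obtain ⟨d, rfl⟩ := Nat.exists_eq_add_of_le hle
  rw [Nat.add_comm, Function.iterate_add_apply, fix_iter h d]
  exact h

theorem reach_small_nat : ∀ n : Nat, n < 50 → pvF (pvF^[5] ((n : Int))) = pvF^[5] ((n : Int)) := by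
  decide

theorem reach_small {x : Int} (h0 : 0 ≤ x) (h1 : x < 50) : pvF (pvF^[5] x) = pvF^[5] x := by
  have hx : ((x.toNat : Int)) = x := Int.toNat_of_nonneg h0
  have := reach_small_nat x.toNat (by omega)
  rwa [hx] at this

theorem reach_pos : ∀ (k : Nat) (x : Int), 0 ≤ x → x ≤ 2 ^ k →
    pvF (pvF^[k + 5] x) = pvF^[k + 5] x := by
  intro k
  induction k with
  | zero =>
    intro x h0 h1
    exact reach_small h0 (by norm_num at h1; omega)
  | succ k ih =>
    intro x h0 h1
    by_cases hs : x < 50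
    · exact fix_mono (by omega) (reach_small h0 hs)
    · by_cases he : x % 2 = 0
      · have hf : pvF x = x / 2 := pvF_big_even (by omega) he
        have h2 : (2 : Int) ^ (k + 1) = 2 * 2 ^ k := by ring
        rw [h2] at h1
        have hd0 : 0 ≤ x / 2 := by omega
        have hd1 : x / 2 ≤ 2 ^ k := by omega
        have := ih (x / 2) hd0 hd1
        have hit : pvF^[k + 1 + 5] x = pvF^[k + 5] (pvF x) := by
          have : k + 1 + 5 = (k + 5) + 1 := by omega
          rw [this, Function.iterate_succ_apply]
        rw [hit, hf]
        exact this
      · have hfix : pvF x = x := fix_big_odd (by omega) he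
        exact fix_mono (Nat.zero_le _) (by simpa using hfix)

theorem reach64 {x : Int} (hd : pvDomInt x = true) (hp : 0 ≤ x ∨ x % 2 = 0 ∨ x = -1) :
    ∃ n < 64, pvF (pvF^[n] x) = pvF^[n] x := by
  by_cases h0 : 0 ≤ x
  · refine ⟨36, by omega, ?_⟩
    have hb : x ≤ 2 ^ 31 := by
      simp only [pvDomInt, decide_eq_true_eq] at hd
      norm_num
      omega
    exact reach_pos 31 x h0 hb
  · refine ⟨0, by omega, ?_⟩
    push Not at h0
    rcases hp with h | h | h
    · omega
    · have hfix : pvF x = x := fix_small_even (by omega) h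
      simpa using hfix
    · subst h
      have hfix : pvF (-1) = -1 := by decide
      simpa using hfix

-- pvSteps facts
theorem steps_zero {x : Int} (h : pvF x = x) : ∀ m : Nat, pvSteps x m = 0 := by
  intro m
  cases m with
  | zero => rfl
  | succ m => simp [pvSteps, h]

theorem steps_succ {x : Int} (h : pvF x ≠ x) (m : Nat) :
    pvSteps x (m + 1) = 1 + pvSteps (pvF x) m := by
  simp [pvSteps, h]

theorem steps_nonneg : ∀ (m : Nat) (x : Int), 0 ≤ pvSteps x m := by
  intro m
  induction m with
  | zero => intro x; simp [pvSteps]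
  | succ m ih =>
    intro x
    by_cases h : pvF x = x
    · simp [pvSteps, h]
    · rw [steps_succ h]
      have := ih (pvF x)
      omega

-- max-of-list machinery
def pvM (l : List Int) : Int := l.foldl max 0

theorem foldl_max_max : ∀ (l : List Int) (a b : Int), l.foldl max (max a b) = max a (l.foldl max b) := by
  intro l
  induction l with
  | nil => intro a b; rfl
  | cons c l ih =>
    intro a b
    show l.foldl max (max (max a b) c) = max a (l.foldl max (max b c))
    rw [max_assoc, ih]

theorem pvM_cons (x : Int) (l : List Int) : pvM (x :: l) = max x (pvM l) := by
  show l.foldl max (max 0 x) = max x (pvM l)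
  rw [max_comm, foldl_max_max]
  rfl

theorem pvM_nonneg : ∀ l : List Int, 0 ≤ pvM l := by
  intro l
  induction l with
  | nil => simp [pvM]
  | cons x l ih => rw [pvM_cons]; exact le_trans ih (le_max_right _ _)

theorem pvM_zero : ∀ l : List Int, (∀ y ∈ l, y = 0) → pvM l = 0 := by
  intro l
  induction l with
  | nil => intro _; rfl
  | cons x l ih =>
    intro h
    rw [pvM_cons, h x (by simp), ih (fun y hy => h y (by simp [hy]))]
    simp

theorem step_max (m : Nat) : ∀ l : List Int, (∃ x ∈ l, pvF x ≠ x) →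
    pvM (l.map (fun x => pvSteps x (m + 1))) = 1 + pvM (l.map (fun x => pvSteps (pvF x) m)) := by
  intro l
  induction l with
  | nil => rintro ⟨x, hx, -⟩; exact absurd hx (by simp)
  | cons x l ih =>
    rintro ⟨y, hy, hyf⟩
    rw [List.map_cons, List.map_cons, pvM_cons, pvM_cons]
    by_cases hx : pvF x = x
    · have hxs : pvSteps x (m + 1) = 0 := steps_zero hx _
      have hxs' : pvSteps (pvF x) m = 0 := by rw [hx]; exact steps_zero hx _
      have htail : ∃ z ∈ l, pvF z ≠ z := by
        rcases List.mem_cons.mp hy with rfl | hyl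
        · exact absurd hx hyf
        · exact ⟨y, hyl, hyf⟩
      rw [hxs, hxs', ih htail]
      have h1 := pvM_nonneg (l.map (fun x => pvSteps (pvF x) m))
      omega
    · rw [steps_succ hx]
      by_cases ht : ∃ z ∈ l, pvF z ≠ z
      · rw [ih ht]
        have := pvM_nonneg (l.map (fun x => pvSteps (pvF x) m))
        have := steps_nonneg m (pvF x)
        simp only [max_def]
        split_ifs <;> omega
      · push Not at ht
        have hL : pvM (l.map (fun x => pvSteps x (m + 1))) = 0 :=
          pvM_zero _ (by
            intro y hy
            simp only [List.mem_map] at hy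
            obtain ⟨z, hz, rfl⟩ := hy
            exact steps_zero (ht z hz) _)
        have hR : pvM (l.map (fun x => pvSteps (pvF x) m)) = 0 :=
          pvM_zero _ (by
            intro y hy
            simp only [List.mem_map] at hy
            obtain ⟨z, hz, rfl⟩ := hy
            rw [ht z hz]
            exact steps_zero (ht z hz) _)
        have := steps_nonneg m (pvF x)
        rw [hL, hR]
        simp only [max_def]
        split_ifs <;> omega

-- the inline lambda in port A is exactly pvF
theorem lamA_eq : (fun i =>
      if 50 ≤ i ∧ PySem.Int.mod i 2 = 0 then PySem.Int.floordiv i 2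
      else if i < 50 ∧ PySem.Int.mod i 2 ≠ 0 then i * 2 + 1 else i) = pvF := rfl

theorem map_self_iff {f : Int → Int} : ∀ l : List Int, l.map f = l ↔ ∀ x ∈ l, f x = x := by
  intro l
  induction l with
  | nil => simp
  | cons x l ih => simp [ih]

theorem main_loop : ∀ (fuel : Nat) (arr : List Int) (c : Int),
    (∀ x ∈ arr, ∃ n < fuel, pvF (pvF^[n] x) = pvF^[n] x) →
    solutionLoopA arr c fuel = c + pvM (arr.map (fun x => pvSteps x fuel)) := by
  intro fuel
  induction fuel with
  | zero =>
    intro arr c h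
    cases arr with
    | nil => simp [solutionLoopA, pvM]
    | cons x l =>
      obtain ⟨n, hn, -⟩ := h x (by simp)
      omega
  | succ m ih =>
    intro arr c h
    simp only [solutionLoopA, lamA_eq]
    by_cases hfix : arr.map pvF = arr
    · rw [if_pos hfix]
      have hall : ∀ x ∈ arr, pvF x = x := (map_self_iff arr).mp hfix
      have : pvM (arr.map (fun x => pvSteps x (m + 1))) = 0 :=
        pvM_zero _ (by
          intro y hy
          simp only [List.mem_map] at hy
          obtain ⟨z, hz, rfl⟩ := hy
          exact steps_zero (hall z hz) _)
      rw [this]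
      omega
    · rw [if_neg hfix]
      have hex : ∃ x ∈ arr, pvF x ≠ x := by
        by_contra hc
        push Not at hc
        exact hfix ((map_self_iff arr).mpr hc)
      have hm1 : 1 ≤ m := by
        by_contra hm
        have hm0 : m = 0 := by omega
        apply hfix
        apply (map_self_iff arr).mpr
        intro x hx
        obtain ⟨n, hn, hf⟩ := h x hx
        have : n = 0 := by omega
        rwa [this] at hf
      have hrec : ∀ y ∈ arr.map pvF, ∃ n < m, pvF (pvF^[n] y) = pvF^[n] y := by
        intro y hy
        simp only [List.mem_map] at hy
        obtain ⟨x, hx, rfl⟩ := hy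
        obtain ⟨n, hn, hf⟩ := h x hx
        cases n with
        | zero =>
          refine ⟨0, by omega, ?_⟩
          simp only [Function.iterate_zero, id_eq] at hf ⊢
          rw [hf]
          exact hf
        | succ n' =>
          refine ⟨n', by omega, ?_⟩
          rwa [Function.iterate_succ_apply] at hf
      rw [ih (arr.map pvF) (c + 1) hrec, List.map_map, step_max m arr hex]
      simp only [Function.comp_def]
      omega

theorem alt_eq_pvM (arr : List Int) : solution_alt arr = pvM (arr.map (fun x => pvSteps x 64)) := by
  unfold solution_alt pvM
  rw [List.foldl_map]
  congr 1
  funext b x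
  simp only [max_def]
  split_ifs <;> omega

-- ===== VERDICT (by name: the statement is the Claim_ definition above) =====
theorem solution_spec : Claim_equal_solution := by
  intro arr hdom hpre
  show solution arr = solution_alt arr
  unfold solution
  rw [alt_eq_pvM, main_loop 64 arr 0 ?_]
  · omega
  · intro x hx
    have hd : pvDomInt x = true := by
      simp only [Dom_solution, List.all_eq_true] at hdom
      exact hdom x hx
    exact reach64 hd (hpre x hx)
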